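-- pv_equiv track=rewrite | github.com/TobiasBengtsson/AdventOfCode2020 | day14/day14pt2.py | get_union_idxs
-- ===== SOURCE A (Python) =====
-- def get_union_idxs(depth, sets_n):
--     # https://proofwiki.org/wiki/Cardinality_of_Set_Union
--     # Returns a list of lists of indices 1 < i1 < i2 < .. < ik < n
--     # for given depth = k - 1
--     #
--     # E.g.
--     # get_union_idxs(3, 4)
--     # [[0, 1, 2], [0, 1, 3], [0, 2, 3], [1, 2, 3]]
--     if depth == 0:
--         for i in range(sets_n):
--             yield [i]
--         return
--
--     if depth >= sets_n:
--         raise Exception("Depth was greater than number of sets")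
--
--     # We build by appending the last ik to the prev. depth
--     # E.g.
--     # prev_depth            depth
--     # [0, 1]                [0, 1, 2]
--     #                       [0, 1, 3]
--     #                       [0, 1, 4]
--     # [0, 2]                [0, 2, 3]
--     #                       [0, 2, 4]
--     # [0, 3]                [0, 3, 4]
--     # [1, 2]                [1, 2, 3]
--     #                       [1, 2, 4]
--     # ...
--     prev_depth = get_union_idxs(depth - 1, sets_n)
--     for p in prev_depth:
--         i = p[-1] + 1
--         while i < sets_n:
--             p_copy = p.copy()
--             p_copy.append(i)
--             yield p_copy
--             i += 1
-- ===== SOURCE B (Python) =====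
-- def get_union_idxs(depth, sets_n):
--     # Choose the first index, then recurse on the remaining suffix
--     # (front-first recursion on k = depth + 1), instead of extending
--     # previous-depth combinations at the back.
--     if depth != 0 and depth >= sets_n:
--         raise Exception("Depth was greater than number of sets")
--
--     def rec(start, k):
--         if k == 0:
--             yield []
--             return
--         for i in range(start, sets_n):
--             for rest in rec(i + 1, k - 1):
--                 yield [i] + rest
--
--     yield from rec(0, depth + 1)
-- ===== Notes on version B (the rewrite author's own statement) =====
-- stated objective: alternative
-- what changed: B enumerates each combination front-first by recursion on (start, k) - choose the first index i, recurse for the remaining k-1 indices from i+1 - instead of A's recursion on depth that extends every previous-depth combination by all possible larger last elements.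
import Mathlib
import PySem

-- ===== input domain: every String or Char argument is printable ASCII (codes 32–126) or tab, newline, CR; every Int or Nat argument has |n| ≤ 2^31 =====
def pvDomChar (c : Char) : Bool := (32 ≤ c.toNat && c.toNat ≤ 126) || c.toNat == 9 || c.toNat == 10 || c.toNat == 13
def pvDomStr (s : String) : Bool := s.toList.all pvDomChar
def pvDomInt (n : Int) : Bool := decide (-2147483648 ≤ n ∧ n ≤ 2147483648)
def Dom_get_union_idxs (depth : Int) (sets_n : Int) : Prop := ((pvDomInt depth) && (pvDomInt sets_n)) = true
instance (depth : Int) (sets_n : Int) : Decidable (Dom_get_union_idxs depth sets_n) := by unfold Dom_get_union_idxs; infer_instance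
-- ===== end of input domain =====

-- B enumerates the combinations front-first (choose the first index, recurse on the tail with k-1)
-- instead of A's back-extension of all previous-depth combinations; equivalence proved on the
-- inputs where the Python returns (depth = 0, or 0 < depth < sets_n).

-- ===== PORT A =====
-- 'i = p[-1] + 1; while i < sets_n: p_copy = p.copy(); p_copy.append(i); yield p_copy; i += 1'
-- (p is never empty when this runs, so the .getD 0 default below is never consulted)
def pvWhileA (sets_n : Int) (p : List Int) (i : Int) : List (List Int) :=
  if i < sets_n then (p ++ [i]) :: pvWhileA sets_n p (i + 1) else []
termination_by (sets_n - i).toNat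
decreasing_by omega

def get_union_idxs (depth : Int) (sets_n : Int) : List (List Int) :=
  if depth = 0 then
    (PySem.List.pyRange 0 sets_n 1).map (fun i => [i])
  else if depth ≥ sets_n then []       -- Python raises Exception here (excluded by Pre_)
  else if depth < 0 then []            -- Python recurses without bound here (excluded by Pre_); totality guard
  else
    (get_union_idxs (depth - 1) sets_n).flatMap
      (fun p => pvWhileA sets_n p ((PySem.List.pyGet? p (-1)).getD 0 + 1))
termination_by depth.toNat
decreasing_by omega

-- ===== PORT B =====
-- 'def rec(start, k): if k == 0: yield []; return; for i in range(start, sets_n): for rest in rec(i+1, k-1): yield [i] + rest'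
def pvRecB (sets_n : Int) (start : Int) (k : Int) : List (List Int) :=
  if k = 0 then [[]]
  else if k < 0 then []                -- Python recurses without bound for k < 0 (unreachable from admitted inputs); totality guard
  else
    (PySem.List.pyRange start sets_n 1).flatMap
      (fun i => (pvRecB sets_n (i + 1) (k - 1)).map (fun rest => i :: rest))
termination_by k.toNat
decreasing_by omega

def get_union_idxs_alt (depth : Int) (sets_n : Int) : List (List Int) :=
  if depth ≠ 0 ∧ depth ≥ sets_n then []   -- Python raises Exception here (excluded by Pre_)
  else pvRecB sets_n 0 (depth + 1)

-- ===== PRECONDITION & SPEC =====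
-- Pre_ excludes exactly the inputs where Python A raises: depth < 0 (unbounded recursion,
-- RecursionError or the explicit Exception) and 0 < depth with depth >= sets_n (explicit Exception).
def Pre_get_union_idxs (depth : Int) (sets_n : Int) : Prop :=
  depth = 0 ∨ (0 < depth ∧ depth < sets_n)
instance (depth : Int) (sets_n : Int) : Decidable (Pre_get_union_idxs depth sets_n) := by
  unfold Pre_get_union_idxs; infer_instance

def pvWitness_get_union_idxs : Int × Int := (2, 4)

def Spec_get_union_idxs (depth : Int) (sets_n : Int) (out : List (List Int)) : Prop := out = get_union_idxs_alt depth sets_n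
instance (depth : Int) (sets_n : Int) (out : List (List Int)) : Decidable (Spec_get_union_idxs depth sets_n out) := by unfold Spec_get_union_idxs; infer_instance

-- ===== CLAIM (what is proved, stated in full; the proofs are below) =====
def Claim_equal_get_union_idxs : Prop := ∀ (depth : Int) (sets_n : Int), Dom_get_union_idxs depth sets_n → Pre_get_union_idxs depth sets_n → Spec_get_union_idxs depth sets_n (get_union_idxs depth sets_n)

-- ===== LEMMAS AND PROOFS =====

-- A's inner while loop is a map over range(i, sets_n).
theorem pvWhileA_eq_map (sets_n : Int) (p : List Int) (i : Int) :
    pvWhileA sets_n p i = (PySem.List.pyRange i sets_n 1).map (fun j => p ++ [j]) := by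
  rw [pvWhileA]
  split
  · rename_i h
    rw [PySem.List.pyRange_one_cons h, List.map_cons, pvWhileA_eq_map]
  · rename_i h
    have : PySem.List.pyRange i sets_n 1 = [] := by
      simp [PySem.List.pyRange]; omega
    simp [this]
termination_by (sets_n - i).toNat
decreasing_by omega

-- every combination produced by pvRecB with k ≥ 1 is nonempty
theorem pvRecB_ne_nil (sets_n s : Int) (k : Int) (hk : 0 < k) :
    ∀ p ∈ pvRecB sets_n s k, p ≠ [] := by
  intro p hp
  rw [pvRecB] at hp
  rw [if_neg (by omega), if_neg (by omega)] at hp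
  simp only [List.mem_flatMap, List.mem_map] at hp
  obtain ⟨i, -, rest, -, rfl⟩ := hp
  simp

-- one level of pvRecB with positive k, unfolded
theorem pvRecB_pos (sets_n s : Int) (k : Int) (hk : 0 < k) :
    pvRecB sets_n s k =
      (PySem.List.pyRange s sets_n 1).flatMap
        (fun i => (pvRecB sets_n (i + 1) (k - 1)).map (fun rest => i :: rest)) := by
  rw [pvRecB, if_neg (by omega), if_neg (by omega)]

-- pvRecB at k = 1 is the list of singletons
theorem pvRecB_one (sets_n s : Int) :
    pvRecB sets_n s 1 = (PySem.List.pyRange s sets_n 1).map (fun i => [i]) := by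
  rw [pvRecB_pos sets_n s 1 (by omega)]
  simp [pvRecB, List.map_eq_flatMap]

-- KEY: extending every combination of pvRecB (k+1) by one larger last element gives pvRecB (k+2)
theorem flatMap_ext_pvRecB (sets_n : Int) (k : Nat) :
    ∀ s : Int,
      (pvRecB sets_n s ((k : Int) + 1)).flatMap
          (fun p => pvWhileA sets_n p ((PySem.List.pyGet? p (-1)).getD 0 + 1))
        = pvRecB sets_n s ((k : Int) + 2) := by
  induction k with
  | zero =>
    intro s
    norm_num
    rw [pvRecB_one, List.flatMap_map, pvRecB_pos sets_n s 2 (by omega)]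
    apply List.flatMap_congr
    intro i _
    have h1 : PySem.List.pyGet? [i] (-1) = some i := by
      rw [PySem.List.pyGet?_neg_one]; rfl
    rw [h1, Option.getD_some, pvWhileA_eq_map]
    norm_num [pvRecB_one, List.map_map]
  | succ k ih =>
    intro s
    push_cast
    rw [pvRecB_pos sets_n s ((k : Int) + 1 + 1) (by omega), List.flatMap_assoc,
        pvRecB_pos sets_n s ((k : Int) + 1 + 2) (by omega)]
    apply List.flatMap_congr
    intro i _
    rw [List.flatMap_map]
    have hin : ∀ p ∈ pvRecB sets_n (i + 1) ((k : Int) + 1 + 1 - 1),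
        pvWhileA sets_n (i :: p) ((PySem.List.pyGet? (i :: p) (-1)).getD 0 + 1)
          = (pvWhileA sets_n p ((PySem.List.pyGet? p (-1)).getD 0 + 1)).map (fun q => i :: q) := by
      intro p hp
      have hne : p ≠ [] := by
        have : ((k : Int) + 1 + 1 - 1) = (k : Int) + 1 := by ring
        rw [this] at hp
        exact pvRecB_ne_nil sets_n (i + 1) ((k : Int) + 1) (by omega) p hp
      have hlast : PySem.List.pyGet? (i :: p) (-1) = PySem.List.pyGet? p (-1) := by
        rw [PySem.List.pyGet?_neg_one, PySem.List.pyGet?_neg_one]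
        cases p with
        | nil => simp at hne
        | cons a as => simp [List.getLast?_cons_cons]
      rw [hlast, pvWhileA_eq_map, pvWhileA_eq_map, List.map_map]
      rfl
    rw [List.flatMap_congr hin]
    have h2 : ((k : Int) + 1 + 1 - 1) = (k : Int) + 1 := by ring
    rw [h2] at *
    calc (pvRecB sets_n (i + 1) ((k : Int) + 1)).flatMap
            (fun p => ((fun p => pvWhileA sets_n p ((PySem.List.pyGet? p (-1)).getD 0 + 1)) p).map (fun q => i :: q))
        = ((pvRecB sets_n (i + 1) ((k : Int) + 1)).flatMap
            (fun p => pvWhileA sets_n p ((PySem.List.pyGet? p (-1)).getD 0 + 1))).map (fun q => i :: q) := by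
          rw [List.map_flatMap]
      _ = (pvRecB sets_n (i + 1) ((k : Int) + 2)).map (fun q => i :: q) := by rw [ih]
      _ = (pvRecB sets_n (i + 1) ((k : Int) + 1 + 2 - 1)).map (fun rest => i :: rest) := by
          have h3 : (k : Int) + 1 + 2 - 1 = (k : Int) + 2 := by ring
          rw [h3]

-- A at admitted depths equals pvRecB from start 0
theorem getA_eq_pvRecB (sets_n : Int) (d : Nat) (hd : (d : Int) < sets_n ∨ d = 0) :
    get_union_idxs (d : Int) sets_n = pvRecB sets_n 0 ((d : Int) + 1) := by
  induction d with
  | zero =>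
    rw [get_union_idxs]
    norm_num [pvRecB_one]
  | succ d ih =>
    have hds : ((d : Int) + 1) < sets_n := by
      rcases hd with h | h
      · exact_mod_cast h
      · omega
    rw [get_union_idxs]
    rw [if_neg (by omega), if_neg (by push_cast; omega), if_neg (by push_cast; omega)]
    have h1 : ((d : Int) + 1 - 1) = (d : Int) := by ring
    push_cast
    rw [h1, ih (Or.inl (by omega)), flatMap_ext_pvRecB]
    have h2 : (d : Int) + 2 = (d : Int) + 1 + 1 := by ring
    rw [h2]

-- ===== VERDICT (by name: the statement is the Claim_ definition above) =====
theorem get_union_idxs_spec : Claim_equal_get_union_idxs := by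
  intro depth sets_n _ hpre
  unfold Spec_get_union_idxs get_union_idxs_alt
  rcases hpre with h0 | ⟨h1, h2⟩
  · subst h0
    rw [if_neg (by simp)]
    rw [get_union_idxs]
    norm_num [pvRecB_one]
  · rw [if_neg (by omega)]
    obtain ⟨d, rfl⟩ : ∃ d : Nat, depth = (d : Int) := ⟨depth.toNat, by omega⟩
    exact getA_eq_pvRecB sets_n d (Or.inl (by omega))
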